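-- pv_equiv track=rewrite | github.com/sleepyheadlnd/Demo | Asst 6, cs-335-s23/A6_P3_Resolution_DANG_DUC.py | get_resolvents
-- ===== SOURCE A (Python) =====
-- def get_resolvents(c1, c2):
--
--    res = []
--    temp = []
--
--    for i in c1:
--       for j in c2:
--          if i == '~'+j or j == '~'+i :
--             for x in c1:
--                if x != i:
--                   temp.append(x)
--             for y in c2:
--                if y != j:
--                   temp.append(y)
--             res.append(temp)
--             temp=[]
--    return res
-- ===== SOURCE B (Python) =====
-- def get_resolvents(c1, c2):
--     # Position index of c2: literal value -> sorted list of indices where it occurs.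
--     pos = {}
--     for idx, j in enumerate(c2):
--         pos.setdefault(j, []).append(idx)
--     body2 = {}  # memoized c2-with-j-removed, per distinct literal value
--     res = []
--     for i in c1:
--         idxs = pos.get('~' + i, [])
--         if i.startswith('~'):
--             idxs = sorted(idxs + pos.get(i[1:], []))
--         if not idxs:
--             continue
--         body1 = [x for x in c1 if x != i]
--         for idx in idxs:
--             j = c2[idx]
--             if j not in body2:
--                 body2[j] = [y for y in c2 if y != j]
--             res.append(body1 + body2[j])
--     return res
-- ===== Notes on version B (the rewrite author's own statement) =====
-- stated objective: faster
-- what changed: B builds a hash index of c2 (literal -> sorted list of positions) in one pass, then for each literal of c1 looks up its one or two complement values directly (merging the two position lists) instead of scanning c2 per literal, and memoizes the filtered clause bodies; the all-pairs scan of A disappears.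
import Mathlib
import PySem

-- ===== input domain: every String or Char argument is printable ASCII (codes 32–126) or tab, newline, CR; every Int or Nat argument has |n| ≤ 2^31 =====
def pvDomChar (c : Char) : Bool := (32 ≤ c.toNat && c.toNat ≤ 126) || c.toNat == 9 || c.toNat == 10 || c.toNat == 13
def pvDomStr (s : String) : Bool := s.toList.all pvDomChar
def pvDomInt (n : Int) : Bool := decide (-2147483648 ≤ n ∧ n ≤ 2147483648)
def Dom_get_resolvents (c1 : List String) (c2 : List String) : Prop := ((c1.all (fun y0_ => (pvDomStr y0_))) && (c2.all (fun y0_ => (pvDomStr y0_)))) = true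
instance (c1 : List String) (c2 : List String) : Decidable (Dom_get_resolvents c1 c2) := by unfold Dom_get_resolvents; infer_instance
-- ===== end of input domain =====

-- B replaces A's all-pairs scan by a position index of c2 built once: each literal of c1
-- looks up its one or two complement values directly and merges their position lists.

-- ===== PORT A =====
def get_resolvents (c1 : List String) (c2 : List String) : List (List String) :=
  (c1.foldl (fun (st : List (List String) × List String) i =>
      c2.foldl (fun (st : List (List String) × List String) j =>
        if i == "~" ++ j || j == "~" ++ i then
          let temp := c1.foldl (fun t x => if x != i then t ++ [x] else t) st.2
          let temp := c2.foldl (fun t y => if y != j then t ++ [y] else t) temp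
          (st.1 ++ [temp], ([] : List String))
        else st) st) (([] : List (List String)), ([] : List String))).1

-- ===== PORT B =====
-- pos.setdefault(j, []).append(idx) over enumerate(c2)
def pvPosDict (c2 : List String) : PySem.Dict String (List Int) :=
  (PySem.List.enumerate c2).foldl
    (fun d p => PySem.Dict.modify d p.2 [] (fun l => l ++ [p.1])) PySem.Dict.empty

-- idxs = pos.get('~'+i, []); if i.startswith('~'): idxs = sorted(idxs + pos.get(i[1:], []))
def pvIdxsOf (pos : PySem.Dict String (List Int)) (i : String) : List Int :=
  let idxs := pos.getD ("~" ++ i) []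
  if PySem.Str.startswith i "~" then
    PySem.List.sorted (idxs ++ pos.getD (PySem.Str.slice i (some 1) none) []) (fun x => x) false
  else idxs

def get_resolvents_alt (c1 : List String) (c2 : List String) : List (List String) :=
  let pos := pvPosDict c2
  (c1.foldl (fun (st : List (List String) × PySem.Dict String (List String)) i =>
      let idxs := pvIdxsOf pos i
      if idxs.isEmpty then st
      else
        let body1 := c1.filter (fun x => x != i)
        idxs.foldl (fun st idx =>
          -- j = c2[idx]; every index stored in pos is in range, so the default is never used
          let j := PySem.List.pyGetD c2 idx ""
          let d := if st.2.contains j then st.2 else st.2.insert j (c2.filter (fun y => y != j))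
          (st.1 ++ [body1 ++ d.getD j []], d)) st)
    (([] : List (List String)), (PySem.Dict.empty : PySem.Dict String (List String)))).1

-- ===== PRECONDITION & SPEC =====
def Spec_get_resolvents (c1 : List String) (c2 : List String) (out : List (List String)) : Prop := out = get_resolvents_alt c1 c2
instance (c1 : List String) (c2 : List String) (out : List (List String)) : Decidable (Spec_get_resolvents c1 c2 out) := by unfold Spec_get_resolvents; infer_instance

-- ===== CLAIM (what is proved, stated in full; the proofs are below) =====
def Claim_equal_get_resolvents : Prop := ∀ (c1 : List String) (c2 : List String), Dom_get_resolvents c1 c2 → Spec_get_resolvents c1 c2 (get_resolvents c1 c2)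

-- ===== LEMMAS AND PROOFS =====

-- clause bodies with the resolved literal removed; the complementarity test; a literal's block
def pvF1 (c1 : List String) (i : String) : List String := c1.filter (fun x => x != i)
def pvF2 (c2 : List String) (j : String) : List String := c2.filter (fun y => y != j)
def pvCondA (i j : String) : Bool := i == "~" ++ j || j == "~" ++ i
def pvBlock (c1 c2 : List String) (i : String) : List (List String) :=
  (c2.filter (pvCondA i)).map (fun j => pvF1 c1 i ++ pvF2 c2 j)

-- named forms of A's loop bodies
def pvStateA : Type := List (List String) × List String
def pvStepA (c1 c2 : List String) (i : String) (st : pvStateA) (j : String) : pvStateA :=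
  if i == "~" ++ j || j == "~" ++ i then
    let temp := c1.foldl (fun t x => if x != i then t ++ [x] else t) st.2
    let temp := c2.foldl (fun t y => if y != j then t ++ [y] else t) temp
    (st.1 ++ [temp], ([] : List String))
  else st
def pvOuterA (c1 c2 : List String) (st : pvStateA) (i : String) : pvStateA :=
  c2.foldl (pvStepA c1 c2 i) st

-- named forms of B's loop bodies
def pvStateB : Type := List (List String) × PySem.Dict String (List String)
def pvStepB (c1 c2 : List String) (i : String) (st : pvStateB) (idx : Int) : pvStateB :=
  let j := PySem.List.pyGetD c2 idx ""
  let d := if st.2.contains j then st.2 else st.2.insert j (c2.filter (fun y => y != j))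
  (st.1 ++ [c1.filter (fun x => x != i) ++ d.getD j []], d)
def pvOuterB (c1 c2 : List String) (pos : PySem.Dict String (List Int)) (st : pvStateB) (i : String) : pvStateB :=
  let idxs := pvIdxsOf pos i
  if idxs.isEmpty then st
  else idxs.foldl (pvStepB c1 c2 i) st

-- the matched (index, literal) pairs of i against c2, in c2 order
def pvMatched (c2 : List String) (i : String) : List (Int × String) :=
  (PySem.List.enumerate c2).filter (fun p => pvCondA i p.2)

-- 'i == "~"+j' is exactly 'i starts with "~" and j == i[1:]'
lemma pvTilde_eq (i j : String) :
    (i == "~" ++ j) = (PySem.Str.startswith i "~" && j == PySem.Str.slice i (some 1) none) := by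
  have hs : (PySem.Str.slice i (some 1) none).toList = i.toList.tail := by
    simp [PySem.Str.slice, PySem.List.slice_from]
  have h1 : (i == "~" ++ j) = decide (i.toList = '~' :: j.toList) := by
    rw [Bool.beq_eq_decide_eq]
    simp only [decide_eq_decide]
    rw [← String.toList_inj]; simp
  have h2 : (j == PySem.Str.slice i (some 1) none) = decide (j.toList = i.toList.tail) := by
    rw [Bool.beq_eq_decide_eq]
    simp only [decide_eq_decide]
    rw [← String.toList_inj, hs]
  have h3 : PySem.Str.startswith i "~" = PySem.Chars.startswith i.toList ['~'] := by
    simp [PySem.Str.startswith]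
  rw [h1, h2, h3]
  cases h : i.toList with
  | nil => simp [PySem.Chars.startswith]
  | cons c cs =>
      simp [PySem.Chars.startswith]
      by_cases hc : c = '~'
      · subst hc; simp
        constructor
        · rintro rfl; simp
        · rintro ⟨_, rfl⟩; rfl
      · simp [hc]
        intro hEq; exact (hc hEq.symm).elim

-- ===== A-side: A computes the blocks in order =====

lemma pvStepA_eq (c1 c2 : List String) (i j : String) (res : List (List String)) :
    pvStepA c1 c2 i (res, []) j =
      if pvCondA i j then (res ++ [pvF1 c1 i ++ pvF2 c2 j], ([] : List String)) else (res, []) := by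
  unfold pvStepA pvCondA pvF1 pvF2
  split_ifs with h
  · simp only [PySem.List.foldl_append_if_eq_filter]
    simp
  · rfl

lemma pvInnerA (c1 c2 : List String) (i : String) (l : List String) (res : List (List String)) :
    l.foldl (pvStepA c1 c2 i) (res, ([] : List String))
      = (res ++ (l.filter (pvCondA i)).map (fun j => pvF1 c1 i ++ pvF2 c2 j), ([] : List String)) := by
  induction l generalizing res with
  | nil => simp
  | cons j l ih =>
      simp only [List.foldl_cons, pvStepA_eq, List.filter_cons]
      by_cases h : pvCondA i j = true
      · simp only [h, if_true]
        rw [ih]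
        simp
      · simp only [h, Bool.false_eq_true, if_false]
        exact ih res

lemma pvA_eq (c1 c2 : List String) (l : List String) (res : List (List String)) :
    l.foldl (pvOuterA c1 c2) (res, ([] : List String))
      = (res ++ l.flatMap (pvBlock c1 c2), ([] : List String)) := by
  induction l generalizing res with
  | nil => simp
  | cons i l ih =>
      simp only [List.foldl_cons, List.flatMap_cons]
      rw [show pvOuterA c1 c2 (res, []) i = c2.foldl (pvStepA c1 c2 i) (res, []) from rfl]
      rw [pvInnerA c1 c2 i c2 res, ih]
      simp [pvBlock]

-- ===== B-side: the position index =====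

-- the accumulated position dict, looked up with default []
lemma pvPos_getD (c2v : List (Int × String)) (d : PySem.Dict String (List Int)) (v : String) :
    (c2v.foldl (fun d p => PySem.Dict.modify d p.2 [] (fun l => l ++ [p.1])) d).getD v []
      = d.getD v [] ++ (c2v.filter (fun p => p.2 == v)).map (·.1) := by
  induction c2v generalizing d with
  | nil => simp
  | cons p l ih =>
      simp only [List.foldl_cons, List.filter_cons]
      rw [ih]
      by_cases h : p.2 = v
      · subst h
        rw [PySem.Dict.getD_modify_self]
        simp
      · have hb : (p.2 == v) = false := by simpa using h
        rw [PySem.Dict.getD_modify_of_ne d [] _ (Ne.symm h)]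
        simp [hb]

lemma pvPosDict_getD (c2 : List String) (v : String) :
    (pvPosDict c2).getD v []
      = ((PySem.List.enumerate c2).filter (fun p => p.2 == v)).map (·.1) := by
  unfold pvPosDict
  rw [pvPos_getD]
  simp [PySem.Dict.getD, PySem.Dict.get?_empty]

-- map over a filter testing a projection = filter over the mapped list
lemma pvFilter_map {a b : Type} (l : List a) (f : a → b) (p : b → Bool) :
    (l.filter (fun x => p (f x))).map f = (l.map f).filter p := by
  induction l with
  | nil => rfl
  | cons x l ih =>
      simp only [List.filter_cons, List.map_cons]
      by_cases h : p (f x) <;> simp [h, ih]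

-- a filter by a disjunction of disjoint tests is a permutation of the two filters
lemma pvFilter_or_perm {a : Type} (p q : a → Bool) (l : List a)
    (hdisj : ∀ x, ¬(p x = true ∧ q x = true)) :
    (l.filter (fun x => p x || q x)).Perm (l.filter p ++ l.filter q) := by
  induction l with
  | nil => simp
  | cons x l ih =>
      simp only [List.filter_cons]
      by_cases hp : p x = true
      · have hq : q x = false := by
          rcases Bool.eq_false_or_eq_true (q x) with h | h
          · exact absurd ⟨hp, h⟩ (hdisj x)
          · exact h
        simp only [hp, hq, Bool.true_or, if_true, Bool.false_eq_true, if_false, List.cons_append]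
        exact ih.cons x
      · have hp' : p x = false := by simpa using hp
        by_cases hq : q x = true
        · simp only [hp', hq, Bool.false_or, if_true, Bool.false_eq_true, if_false]
          exact (ih.cons x).trans List.perm_middle.symm
        · have hq' : q x = false := by simpa using hq
          simp only [hp', hq', Bool.false_or, Bool.false_eq_true, if_false]
          exact ih

-- the computed index list is exactly the matched positions, in increasing order
lemma pvIdxs_eq (c2 : List String) (i : String) :
    pvIdxsOf (pvPosDict c2) i = (pvMatched c2 i).map (·.1) := by
  have hpw : ((pvMatched c2 i).map (·.1)).Pairwise (fun x y => x < y) := by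
    apply List.pairwise_map.mpr
    exact (PySem.List.pairwise_lt_enumerate c2 0).filter _
  unfold pvIdxsOf pvMatched
  by_cases h : PySem.Str.startswith i "~" = true
  · simp only [h, if_true]
    have hia : ("~" ++ i).toList = '~' :: i.toList := by simp
    have hib : (PySem.Str.slice i (some 1) none).toList = i.toList.tail := by
      simp [PySem.Str.slice, PySem.List.slice_from]
    have hab : ("~" ++ i) ≠ PySem.Str.slice i (some 1) none := by
      intro hEq
      have := congrArg (fun s => s.toList.length) hEq
      simp only [hia, hib, List.length_cons, List.length_tail] at this
      omega
    have hcond : ∀ p ∈ PySem.List.enumerate c2,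
        (pvCondA i p.2) = ((p.2 == "~" ++ i) || (p.2 == PySem.Str.slice i (some 1) none)) := by
      intro p _
      unfold pvCondA
      rw [pvTilde_eq, h]
      simp [Bool.or_comm]
    rw [pvPosDict_getD, pvPosDict_getD]
    apply PySem.List.sorted_eq_of_perm_of_pairwise_lt
    · rw [← List.map_append]
      apply List.Perm.map
      rw [List.filter_congr hcond]
      apply pvFilter_or_perm
      intro x ⟨hx1, hx2⟩
      exact hab ((eq_of_beq hx1).symm.trans (eq_of_beq hx2))
    · exact hpw
  · have h' : PySem.Str.startswith i "~" = false := by simpa using h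
    simp only [h', Bool.false_eq_true, if_false]
    rw [pvPosDict_getD]
    congr 1
    apply (List.filter_congr _).symm
    intro p _
    unfold pvCondA
    rw [pvTilde_eq, h']
    simp

-- every matched pair really is (index, c2[index])
lemma pvMatched_get (c2 : List String) (i : String) :
    ∀ p ∈ pvMatched c2 i, PySem.List.pyGetD c2 p.1 "" = p.2 := by
  intro p hp
  have hpE : p ∈ PySem.List.enumerate c2 := (List.mem_filter.mp hp).1
  rcases (PySem.List.mem_enumerate_iff c2 0 p).mp hpE with ⟨k, hk, rfl⟩
  simp [PySem.List.pyGetD_natCast, List.getD_eq_getElem?_getD, hk]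

-- snd of the matched pairs = the matched literals
lemma pvMatched_snd (c2 : List String) (i : String) :
    (pvMatched c2 i).map (·.2) = c2.filter (pvCondA i) := by
  unfold pvMatched
  rw [pvFilter_map (PySem.List.enumerate c2) (·.2) (pvCondA i), PySem.List.map_snd_enumerate]

-- ===== B-side: the main loop =====

-- dict invariant: every stored body is the filtered clause for its key
def pvInv (c2 : List String) (d : PySem.Dict String (List String)) : Prop :=
  ∀ j l, d.get? j = some l → l = pvF2 c2 j

lemma pvStepB_eq (c1 c2 : List String) (i : String) (idx : Int) (j : String)
    (hj : PySem.List.pyGetD c2 idx "" = j)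
    (res : List (List String)) (d : PySem.Dict String (List String)) (hd : pvInv c2 d) :
    (pvStepB c1 c2 i (res, d) idx).1 = res ++ [pvF1 c1 i ++ pvF2 c2 j]
    ∧ pvInv c2 (pvStepB c1 c2 i (res, d) idx).2 := by
  unfold pvStepB
  rw [hj]
  by_cases h : d.contains j = true
  · have hsome : (d.get? j).isSome := by
      rw [← PySem.Dict.contains_eq_isSome_get?]; exact h
    rcases Option.isSome_iff_exists.mp hsome with ⟨l, hl⟩
    have hv : d.getD j [] = pvF2 c2 j := by
      rw [PySem.Dict.getD_of_get?_eq_some d [] hl]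
      exact hd j l hl
    simp only [h, if_true]
    exact ⟨by rw [hv]; rfl, hd⟩
  · have h' : d.contains j = false := by simpa using h
    simp only [h', Bool.false_eq_true, if_false]
    constructor
    · rw [PySem.Dict.getD_of_get?_eq_some _ [] (PySem.Dict.get?_insert_self d j _)]
      rfl
    · intro j' l' hget
      by_cases hjj : j' = j
      · subst hjj
        rw [PySem.Dict.get?_insert_self] at hget
        cases hget
        rfl
      · rw [PySem.Dict.get?_insert_of_ne d _ hjj] at hget
        exact hd j' l' hget

-- B's fold over the matched positions appends body1 ++ body2[j] per match, keeping the invariant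
lemma pvInnerB (c1 c2 : List String) (i : String) (l : List (Int × String))
    (hl : ∀ p ∈ l, PySem.List.pyGetD c2 p.1 "" = p.2)
    (res : List (List String)) (d : PySem.Dict String (List String)) (hd : pvInv c2 d) :
    ((l.map (·.1)).foldl (pvStepB c1 c2 i) (res, d)).1
        = res ++ l.map (fun p => pvF1 c1 i ++ pvF2 c2 p.2)
    ∧ pvInv c2 ((l.map (·.1)).foldl (pvStepB c1 c2 i) (res, d)).2 := by
  induction l generalizing res d with
  | nil => exact ⟨by simp, hd⟩
  | cons p l ih =>
      obtain ⟨h1, h2⟩ := pvStepB_eq c1 c2 i p.1 p.2 (hl p (by simp)) res d hd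
      simp only [List.map_cons, List.foldl_cons]
      rw [show pvStepB c1 c2 i (res, d) p.1
            = ((pvStepB c1 c2 i (res, d) p.1).1, (pvStepB c1 c2 i (res, d) p.1).2) from rfl]
      obtain ⟨ih1, ih2⟩ := ih (fun q hq => hl q (by simp [hq]))
        (pvStepB c1 c2 i (res, d) p.1).1 (pvStepB c1 c2 i (res, d) p.1).2 h2
      refine ⟨?_, ih2⟩
      rw [ih1, h1]
      simp

-- B computes the same blocks as A, threading the memo dict
lemma pvB_eq (c1 c2 : List String) (l : List String) (res : List (List String))
    (d : PySem.Dict String (List String)) (hd : pvInv c2 d) :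
    (l.foldl (pvOuterB c1 c2 (pvPosDict c2)) (res, d)).1 = res ++ l.flatMap (pvBlock c1 c2) := by
  induction l generalizing res d with
  | nil => simp
  | cons i l ih =>
      simp only [List.foldl_cons, List.flatMap_cons]
      rw [show pvOuterB c1 c2 (pvPosDict c2) (res, d) i
            = if (pvIdxsOf (pvPosDict c2) i).isEmpty then (res, d)
              else (pvIdxsOf (pvPosDict c2) i).foldl (pvStepB c1 c2 i) (res, d) from rfl]
      rw [pvIdxs_eq]
      by_cases he : ((pvMatched c2 i).map (·.1)).isEmpty = true
      · have hm : pvMatched c2 i = [] := by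
          rcases List.isEmpty_iff.mp he with h
          exact List.map_eq_nil_iff.mp h
        have hfil : c2.filter (pvCondA i) = [] := by
          rw [← pvMatched_snd, hm]; rfl
        simp only [he, if_true]
        rw [ih res d hd]
        simp [pvBlock, hfil]
      · simp only [he, Bool.false_eq_true, if_false]
        obtain ⟨h1, h2⟩ := pvInnerB c1 c2 i (pvMatched c2 i) (pvMatched_get c2 i) res d hd
        have key := ih (((pvMatched c2 i).map (·.1)).foldl (pvStepB c1 c2 i) (res, d)).1
          (((pvMatched c2 i).map (·.1)).foldl (pvStepB c1 c2 i) (res, d)).2 h2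
        rw [Prod.mk.eta] at key
        refine key.trans ?_
        rw [h1]
        have : (pvMatched c2 i).map (fun p => pvF1 c1 i ++ pvF2 c2 p.2)
            = pvBlock c1 c2 i := by
          rw [show (pvMatched c2 i).map (fun p => pvF1 c1 i ++ pvF2 c2 p.2)
                = ((pvMatched c2 i).map (·.2)).map (fun j => pvF1 c1 i ++ pvF2 c2 j) by
              rw [List.map_map]; rfl]
          rw [pvMatched_snd]; rfl
        rw [this]
        simp

-- ===== VERDICT (by name: the statement is the Claim_ definition above) =====
theorem get_resolvents_spec : Claim_equal_get_resolvents := by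
  intro c1 c2 _
  unfold Spec_get_resolvents
  have hA : get_resolvents c1 c2 = (c1.foldl (pvOuterA c1 c2) ([], [])).1 := rfl
  have hB : get_resolvents_alt c1 c2
      = (c1.foldl (pvOuterB c1 c2 (pvPosDict c2)) ([], PySem.Dict.empty)).1 := rfl
  rw [hA, hB, pvA_eq c1 c2 c1 [],
    pvB_eq c1 c2 c1 [] PySem.Dict.empty (by intro j l h; rw [PySem.Dict.get?_empty] at h; cases h)]
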